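-- pv_equiv track=rewrite | github.com/pypi-data/pypi-mirror-336 | packages/cqlpy/cqlpy-0.3.1.tar.gz/cqlpy-0.3.1/cqlpy/_internal/scripts/fhir_map_generator.py | extract_choices
-- ===== SOURCE A (Python) =====
-- from itertools import groupby
--
-- def identify_shared_prefix(texts: list[str]) -> str:
--     shared_text = None
--     for text in texts:
--         if shared_text is None:
--             shared_text = text
--             continue
--
--         last_index = min(len(shared_text), len(text))
--         for index in range(last_index):
--             if shared_text[index] != text[index]:
--                 shared_text = shared_text[:index]
--                 break
--
--     if shared_text is None:
--         raise ValueError("No shared text found")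
--     return shared_text
--
-- def extract_choices(resource: dict) -> dict[str, list[str]]:
--     property_descriptions = {
--         property: value
--         for property, attributes in resource["properties"].items()
--         for key, value in attributes.items()
--         if key == "description"
--     }
--     sorted_descriptions = dict(
--         sorted(property_descriptions.items(), key=lambda x: x[1])
--     )
--     grouped_descriptions = groupby(
--         sorted_descriptions, lambda value: property_descriptions[value]
--     )
--     shared_descriptions = []
--     for _, group in grouped_descriptions:
--         shared = list(group)
--         if len(shared) > 1:
--             shared_descriptions.append(shared)
--
--     return {identify_shared_prefix(shared): shared for shared in shared_descriptions}
-- ===== SOURCE B (Python) =====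
-- def identify_shared_prefix(texts: list[str]) -> str:
--     shared_text = None
--     for text in texts:
--         if shared_text is None:
--             shared_text = text
--             continue
--
--         last_index = min(len(shared_text), len(text))
--         for index in range(last_index):
--             if shared_text[index] != text[index]:
--                 shared_text = shared_text[:index]
--                 break
--
--     if shared_text is None:
--         raise ValueError("No shared text found")
--     return shared_text
--
--
-- def extract_choices(resource: dict) -> dict[str, list[str]]:
--     groups: dict[str, list[str]] = {}
--     for name, attributes in resource["properties"].items():
--         description = attributes.get("description")
--         if description is not None:
--             groups.setdefault(description, []).append(name)
--     shared = [
--         members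
--         for _, members in sorted(groups.items(), key=lambda kv: kv[0])
--         if len(members) > 1
--     ]
--     return {identify_shared_prefix(members): members for members in shared}
-- ===== Notes on version B (the rewrite author's own statement) =====
-- stated objective: simpler
-- what changed: A sorts every property by its description and runs itertools.groupby over a rebuilt dict keyed back through the description map; B makes one pass building description -> member-names with setdefault/append and sorts only the resulting groups, dropping the per-property sort, the dict reconstruction and groupby entirely.
import Mathlib
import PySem

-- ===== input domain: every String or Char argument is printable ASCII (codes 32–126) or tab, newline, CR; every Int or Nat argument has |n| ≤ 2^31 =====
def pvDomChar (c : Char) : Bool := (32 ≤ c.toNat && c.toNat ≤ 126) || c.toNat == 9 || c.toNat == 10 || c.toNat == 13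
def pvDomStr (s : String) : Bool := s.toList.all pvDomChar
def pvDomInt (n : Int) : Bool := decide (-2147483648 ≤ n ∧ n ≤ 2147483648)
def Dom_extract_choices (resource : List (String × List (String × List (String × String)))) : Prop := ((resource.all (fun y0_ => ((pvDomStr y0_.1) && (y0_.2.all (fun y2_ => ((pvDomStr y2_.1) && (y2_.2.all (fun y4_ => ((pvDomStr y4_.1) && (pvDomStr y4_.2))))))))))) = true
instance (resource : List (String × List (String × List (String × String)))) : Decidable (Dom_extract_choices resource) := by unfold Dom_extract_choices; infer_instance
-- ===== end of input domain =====

-- B is a one-pass regrouping of A: instead of sorting every property by its description and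
-- running groupby over a rebuilt dict, B builds description -> member-names in one scan and
-- sorts only the surviving groups (objective: simpler; identify_shared_prefix reused verbatim).

-- ===== PORT A =====
-- shared helper: inner loop of identify_shared_prefix — truncate `shared` at the first
-- mismatching position within the common length window (exact transliteration of the
-- 'for index in range(last_index)' loop with its break)
def pvTrunc : List Char → List Char → List Char
  | s, [] => s
  | [], _ => []
  | a :: s, b :: t => if a == b then a :: pvTrunc s t else []

-- shared helper (used verbatim by A and by B, as in the Python sources)
def identify_shared_prefix (texts : List String) : String :=
  match texts.foldl (fun shared text =>
      match shared with
      | none => some text.toList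
      | some s => some (pvTrunc s text.toList)) none with
  | none => ""   -- Python raises ValueError here; unreachable from both call sites (groups are nonempty)
  | some s => String.ofList s

-- itertools.groupby(xs, key) consumed into a list of (key, group) pairs
def pyGroupBy {α κ : Type} [BEq κ] (key : α → κ) : List α → List (κ × List α)
  | [] => []
  | x :: xs =>
    (key x, x :: xs.takeWhile (fun y => key y == key x)) ::
      pyGroupBy key (xs.dropWhile (fun y => key y == key x))
termination_by xs => xs.length
decreasing_by
  exact Nat.lt_succ_of_le (List.length_dropWhile_le _ _)

def extract_choices (resource : List (String × List (String × List (String × String)))) : List (String × List String) :=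
  -- resource["properties"]: Pre_ guarantees the key is present (KeyError otherwise)
  let props := (PySem.Dict.mk resource).getD "properties" []
  let property_descriptions : PySem.Dict String String :=
    props.foldl (fun d pa =>
      pa.2.foldl (fun d kv => if kv.1 == "description" then d.insert pa.1 kv.2 else d) d)
      PySem.Dict.empty
  let sorted_descriptions : PySem.Dict String String :=
    (PySem.List.sorted property_descriptions.items (fun x => x.2) false).foldl
      (fun d p => d.insert p.1 p.2) PySem.Dict.empty
  -- property_descriptions[value] is always present for keys of sorted_descriptions: getD is exact
  let grouped_descriptions :=
    pyGroupBy (fun v => property_descriptions.getD v "") sorted_descriptions.keys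
  let shared_descriptions :=
    grouped_descriptions.foldl (fun acc g => if g.2.length > 1 then acc ++ [g.2] else acc) []
  (shared_descriptions.foldl
      (fun d shared => d.insert (identify_shared_prefix shared) shared)
      PySem.Dict.empty).items

-- ===== PORT B =====
def extract_choices_alt (resource : List (String × List (String × List (String × String)))) : List (String × List String) :=
  -- resource["properties"]: same KeyError as A, excluded by Pre_
  let props := (PySem.Dict.mk resource).getD "properties" []
  let groups : PySem.Dict String (List String) :=
    props.foldl (fun d pa =>
      match (PySem.Dict.mk pa.2).get? "description" with
      | none => d
      | some desc => d.modify desc [] (fun ms => ms ++ [pa.1])) PySem.Dict.empty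
  let shared :=
    ((PySem.List.sorted groups.items (fun kv => kv.1) false).filter
        (fun kv => kv.2.length > 1)).map (fun kv => kv.2)
  (shared.foldl
      (fun d members => d.insert (identify_shared_prefix members) members)
      PySem.Dict.empty).items

-- ===== PRECONDITION & SPEC =====
-- Pre_ requires the "properties" key (A raises KeyError without it) and excludes association
-- lists with duplicate dictionary keys at any level: no Python dict produces them, and on such
-- lists the first-match/last-match choice of the representation is accidental.
def Pre_extract_choices (resource : List (String × List (String × List (String × String)))) : Prop :=
  (resource.map (·.1)).Nodup ∧ "properties" ∈ resource.map (·.1) ∧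
  ∀ pr ∈ resource, (pr.2.map (·.1)).Nodup ∧ ∀ pa ∈ pr.2, (pa.2.map (·.1)).Nodup

instance (resource : List (String × List (String × List (String × String)))) : Decidable (Pre_extract_choices resource) := by unfold Pre_extract_choices; infer_instance

def pvWitness_extract_choices : (List (String × List (String × List (String × String)))) :=
  [("properties",
    [("choiceA", [("description", "pick one")]),
     ("choiceB", [("description", "pick one")]),
     ("other", [("type", "string")])])]

def Spec_extract_choices (resource : List (String × List (String × List (String × String)))) (out : List (String × List String)) : Prop := out = extract_choices_alt resource
instance (resource : List (String × List (String × List (String × String)))) (out : List (String × List String)) : Decidable (Spec_extract_choices resource out) := by unfold Spec_extract_choices; infer_instance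

-- ===== CLAIM (what is proved, stated in full; the proofs are below) =====
def Claim_equal_extract_choices : Prop := ∀ (resource : List (String × List (String × List (String × String)))), Dom_extract_choices resource → Pre_extract_choices resource → Spec_extract_choices resource (extract_choices resource)

-- ===== LEMMAS AND PROOFS =====

def pvPairs (props : List (String × List (String × String))) : List (String × String) :=
  props.filterMap (fun pa => ((PySem.Dict.mk pa.2).get? "description").map (fun v => (pa.1, v)))

theorem fold_no_desc (n : String) (attrs : List (String × String)) (d : PySem.Dict String String)
    (h : ∀ kv ∈ attrs, kv.1 ≠ "description") :
    attrs.foldl (fun d kv => if kv.1 == "description" then d.insert n kv.2 else d) d = d := by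
  rw [PySem.List.foldl_congr_mem (g := fun acc _ => acc)]
  · exact PySem.List.foldl_ignore _ _
  · intro acc x hx
    simp [h x hx]

theorem attr_fold (n : String) (attrs : List (String × String))
    (h : (attrs.map (·.1)).Nodup) (d : PySem.Dict String String) :
    attrs.foldl (fun d kv => if kv.1 == "description" then d.insert n kv.2 else d) d
    = match (PySem.Dict.mk attrs).get? "description" with
      | none => d
      | some v => d.insert n v := by
  induction attrs generalizing d with
  | nil => rfl
  | cons kv rest ih =>
    simp only [List.map_cons, List.nodup_cons] at h
    by_cases hk : kv.1 = "description"
    · simp only [List.foldl_cons, hk, beq_self_eq_true, if_pos]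
      have hrest : ∀ p ∈ rest, p.1 ≠ "description" := by
        intro p hp hcon
        exact h.1 (hk ▸ hcon ▸ List.mem_map.mpr ⟨p, hp, rfl⟩)
      rw [fold_no_desc n rest _ hrest]
      simp [PySem.Dict.get?, hk]
    · simp only [List.foldl_cons]
      rw [if_neg (by simpa using hk), ih h.2 d]
      simp [PySem.Dict.get?, hk]

theorem pd_fold (props : List (String × List (String × String)))
    (h : ∀ pa ∈ props, (pa.2.map (·.1)).Nodup) (d : PySem.Dict String String) :
    props.foldl (fun d pa =>
        pa.2.foldl (fun d kv => if kv.1 == "description" then d.insert pa.1 kv.2 else d) d) d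
    = (pvPairs props).foldl (fun d q => d.insert q.1 q.2) d := by
  induction props generalizing d with
  | nil => rfl
  | cons pa rest ih =>
    simp only [List.foldl_cons, pvPairs, List.filterMap_cons]
    rw [attr_fold pa.1 pa.2 (h pa (by simp)) d]
    cases hg : (PySem.Dict.mk pa.2).get? "description" with
    | none => simpa [pvPairs] using ih (fun x hx => h x (by simp [hx])) d
    | some v => simpa [pvPairs] using ih (fun x hx => h x (by simp [hx])) (d.insert pa.1 v)

theorem groups_fold (props : List (String × List (String × String))) (d : PySem.Dict String (List String)) :
    props.foldl (fun d pa =>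
        match (PySem.Dict.mk pa.2).get? "description" with
        | none => d
        | some desc => d.modify desc [] (fun ms => ms ++ [pa.1])) d
    = (pvPairs props).foldl (fun d q => d.modify q.2 [] (fun ms => ms ++ [q.1])) d := by
  induction props generalizing d with
  | nil => rfl
  | cons pa rest ih =>
    simp only [List.foldl_cons, pvPairs, List.filterMap_cons]
    cases hg : (PySem.Dict.mk pa.2).get? "description" with
    | none => simpa [pvPairs] using ih d
    | some v => simpa [pvPairs] using ih _

theorem pvPairs_fst_sublist (props : List (String × List (String × String))) :
    ((pvPairs props).map (·.1)).Sublist (props.map (·.1)) := by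
  induction props with
  | nil => simp [pvPairs]
  | cons pa rest ih =>
    simp only [pvPairs, List.filterMap_cons]
    cases hg : (PySem.Dict.mk pa.2).get? "description" with
    | none => simpa [pvPairs] using List.Sublist.cons _ ih
    | some v => simpa [pvPairs] using List.Sublist.cons₂ pa.1 ih

theorem insertBy_filter (x : String × String) (c : String) :
    ∀ (acc : List (String × String)), acc.Pairwise (fun a b => a.2 ≤ b.2) →
    (PySem.List.insertBy (fun a b => decide (a.2 < b.2)) x acc).filter (fun q => q.2 == c)
    = acc.filter (fun q => q.2 == c) ++ (if x.2 == c then [x] else []) := by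
  intro acc
  induction acc with
  | nil =>
    intro _
    simp only [PySem.List.insertBy, List.filter, List.nil_append]
    split <;> simp_all
  | cons y t ih =>
    intro hp
    rw [List.pairwise_cons] at hp
    simp only [PySem.List.insertBy]
    by_cases hlt : x.2 < y.2
    · rw [if_pos (by simpa using hlt)]
      by_cases hxc : x.2 = c
      · -- x goes first; no later element has key c since all ≥ y.2 > x.2 = c
        have hnone : ∀ q ∈ y :: t, ¬(q.2 = c) := by
          intro q hq hqc
          rcases List.mem_cons.mp hq with rfl | hq'
          · exact absurd (hqc ▸ hlt) (by simp [hxc])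
          · exact absurd (lt_of_lt_of_le hlt (hp.1 q hq')) (by simp [hqc, hxc])
        have : (y :: t).filter (fun q => q.2 == c) = [] := by
          rw [List.filter_eq_nil_iff]
          intro q hq; simpa using hnone q hq
        simp [this, hxc]
      · -- x inserted first but has key ≠ c: the c-filter is unchanged
        have hx : ((x.2 == c) : Bool) = false := by simpa using hxc
        simp [List.filter_cons, hx]
    · rw [if_neg (by simpa using hlt)]
      rw [List.filter_cons, List.filter_cons]
      rw [ih hp.2]
      split <;> simp

theorem sorted_filter_key (c : String) (xs : List (String × String)) :
    (PySem.List.sorted xs (fun q => q.2) false).filter (fun q => q.2 == c)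
    = xs.filter (fun q => q.2 == c) := by
  induction xs using List.reverseRecOn with
  | nil => rfl
  | append_singleton ys x ih =>
    rw [PySem.List.sorted_eq_foldl_insertBy, List.foldl_append, ← PySem.List.sorted_eq_foldl_insertBy]
    simp only [List.foldl_cons, List.foldl_nil]
    rw [insertBy_filter x c _ (PySem.List.sorted_pairwise ys (fun q => q.2)), ih, List.filter_append]
    split <;> simp_all


theorem takeWhile_congr {α : Type} (p q : α → Bool) (l : List α) (h : ∀ x ∈ l, p x = q x) :
    l.takeWhile p = l.takeWhile q := by
  induction l with
  | nil => rfl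
  | cons x t ih =>
    simp [List.takeWhile_cons, h x (by simp)]
    split <;> simp_all

theorem dropWhile_congr {α : Type} (p q : α → Bool) (l : List α) (h : ∀ x ∈ l, p x = q x) :
    l.dropWhile p = l.dropWhile q := by
  induction l with
  | nil => rfl
  | cons x t ih =>
    simp [List.dropWhile_cons, h x (by simp)]
    split <;> simp_all

theorem foldl_add_const (c0 : String) (l : List String) (h : ∀ x ∈ l, x = c0) :
    l.foldl PySem.Set.add [c0] = [c0] := by
  induction l with
  | nil => rfl
  | cons x t ih =>
    simp only [List.foldl_cons, h x (by simp), PySem.Set.add_of_mem (by simp : c0 ∈ ([c0] : List String))]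
    exact ih (fun x hx => h x (by simp [hx]))

theorem dropWhile_head_false {α : Type} (p : α → Bool) :
    ∀ (l : List α) (x : α) (xs : List α), l.dropWhile p = x :: xs → p x = false := by
  intro l
  induction l with
  | nil => simp [List.dropWhile]
  | cons a t ih =>
    intro x xs h
    rw [List.dropWhile_cons] at h
    split at h
    · exact ih x xs h
    · cases h
      simp_all

theorem groupBy_sorted (kf : String → String) (s : List (String × String))
    (hk : ∀ p ∈ s, kf p.1 = p.2) (hp : s.Pairwise (fun a b => a.2 ≤ b.2)) :
    pyGroupBy kf (s.map Prod.fst)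
    = (PySem.Set.ofList (s.map Prod.snd)).map
        (fun c => (c, (s.filter (fun q => q.2 == c)).map Prod.fst)) := by
  induction hn : s.length using Nat.strong_induction_on generalizing s with
  | _ n ih =>
  match s, hk, hp with
  | [], _, _ => simp [pyGroupBy]
  | p :: t, hk, hp =>
    have hkp : kf p.1 = p.2 := hk p (by simp)
    rw [List.pairwise_cons] at hp
    set c0 := p.2 with hc0
    set chunk := t.takeWhile (fun q => q.2 == c0) with hchunk
    set rest := t.dropWhile (fun q => q.2 == c0) with hrest
    have hsplit : chunk ++ rest = t := List.takeWhile_append_dropWhile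
    have hch : ∀ q ∈ chunk, q.2 = c0 := by
      intro q hq
      simpa using List.mem_takeWhile_imp hq
    have hrsub : rest.Sublist t := hrest ▸ List.dropWhile_sublist _
    have hrmem : ∀ q ∈ rest, q.2 ≠ c0 := by
      cases hr : rest with
      | nil => simp
      | cons r0 rr =>
        have hr0 : ((r0.2 == c0) : Bool) = false :=
          dropWhile_head_false _ t r0 rr (by rw [← hrest, hr])
        have hr0' : r0.2 ≠ c0 := by simpa using hr0
        have hr0t : r0 ∈ t := hrsub.mem (by simp [hr])
        have hc0le : c0 ≤ r0.2 := hp.1 r0 hr0t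
        have hpw : (r0 :: rr).Pairwise (fun a b => a.2 ≤ b.2) := hr ▸ List.Pairwise.sublist hrsub hp.2
        rw [List.pairwise_cons] at hpw
        intro q hq
        rcases List.mem_cons.mp hq with rfl | hq'
        · exact hr0'
        · have h1 : c0 < r0.2 := lt_of_le_of_ne hc0le (Ne.symm hr0')
          have h2 : r0.2 ≤ q.2 := hpw.1 q hq'
          exact ne_of_gt (lt_of_lt_of_le h1 h2)
    -- left-hand side: one step of pyGroupBy
    have hpred : ∀ q ∈ t, ((fun y => kf y == c0) ∘ Prod.fst) q = ((fun q : String × String => q.2 == c0) q) := by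
      intro q hq
      simp only [Function.comp_apply, hk q (by simp [hq])]
    have hstep : pyGroupBy kf ((p :: t).map Prod.fst)
        = (c0, p.1 :: chunk.map Prod.fst) :: pyGroupBy kf (rest.map Prod.fst) := by
      rw [List.map_cons, pyGroupBy, hkp, List.takeWhile_map, List.dropWhile_map,
        takeWhile_congr _ _ t hpred, dropWhile_congr _ _ t hpred, ← hchunk, ← hrest]
    -- right-hand side key set: c0 :: ofList (rest.map snd)
    have hset : PySem.Set.ofList ((p :: t).map Prod.snd)
        = c0 :: PySem.Set.ofList (rest.map Prod.snd) := by
      rw [List.map_cons, ← hsplit, List.map_append]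
      show List.foldl PySem.Set.add PySem.Set.empty (c0 :: (chunk.map Prod.snd ++ rest.map Prod.snd))
          = c0 :: PySem.Set.ofList (rest.map Prod.snd)
      rw [List.foldl_cons, List.foldl_append]
      have h1 : PySem.Set.add PySem.Set.empty c0 = [c0] := rfl
      rw [h1, foldl_add_const c0 _ (by
        intro x hx
        rcases List.mem_map.mp hx with ⟨q, hq, rfl⟩
        exact hch q hq)]
      have h2 : (rest.map Prod.snd).foldl PySem.Set.add [c0] = PySem.Set.update [c0] (rest.map Prod.snd) := rfl
      rw [h2, PySem.Set.update_eq_append_filter]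
      have h3 : (PySem.Set.ofList (rest.map Prod.snd)).filter
          (fun y => !(PySem.Set.contains [c0] y)) = PySem.Set.ofList (rest.map Prod.snd) := by
        apply List.filter_eq_self.mpr
        intro y hy
        have hy' : y ∈ rest.map Prod.snd := by
          have := PySem.Set.mem_ofList (y := y) (xs := rest.map Prod.snd)
          tauto
        rcases List.mem_map.mp hy' with ⟨q, hq, hqe⟩
        subst hqe
        simpa [PySem.Set.contains] using hrmem q hq
      rw [h3]
      rfl
    rw [hstep, hset, List.map_cons]
    congr 1
    · -- heads agree
      have hfilt : (p :: t).filter (fun q => q.2 == c0) = p :: chunk := by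
        rw [List.filter_cons, if_pos (by simp [hc0])]
        congr 1
        rw [← hsplit, List.filter_append]
        rw [List.filter_eq_self.mpr (fun q hq => by simpa using hch q hq)]
        rw [List.filter_eq_nil_iff.mpr (fun q hq => by simpa using hrmem q hq)]
        simp
      rw [hfilt]
      simp [hc0]
    · -- tails agree: IH on rest, then map congruence
      have hrlen : rest.length < n := by
        rw [← hn]
        exact Nat.lt_succ_of_le (hrsub.length_le)
      rw [ih rest.length hrlen rest (fun q hq => hk q (by simp [hrsub.mem hq]))
          (List.Pairwise.sublist hrsub hp.2) rfl]
      apply List.map_congr_left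
      intro c hc
      have hc' : c ∈ rest.map Prod.snd := by
        have := PySem.Set.mem_ofList (y := c) (xs := rest.map Prod.snd)
        tauto
      rcases List.mem_map.mp hc' with ⟨q, hq, hqe⟩
      subst hqe
      have hqc : q.2 ≠ c0 := hrmem q hq
      congr 1
      rw [List.filter_cons, if_neg (by simp; exact Ne.symm hqc), ← hsplit, List.filter_append]
      rw [(List.filter_eq_nil_iff (l := chunk)).mpr (fun r hr => by
        have := hch r hr
        simp [this]
        exact Ne.symm hqc)]
      simp

theorem ofList_sublist {α : Type} [BEq α] [LawfulBEq α] (l : List α) :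
    (PySem.Set.ofList l).Sublist l := by
  induction l using List.reverseRecOn with
  | nil => simp [PySem.Set.ofList, PySem.Set.empty]
  | append_singleton xs x ih =>
    rw [PySem.Set.ofList_append_singleton, PySem.Set.add_eq_ite]
    split
    · exact ih.trans (List.sublist_append_left xs [x])
    · exact ih.append (List.Sublist.refl [x])

theorem ofList_pairwise_lt (l : List String) (h : l.Pairwise (· ≤ ·)) :
    (PySem.Set.ofList l).Pairwise (· < ·) := by
  have h1 : (PySem.Set.ofList l).Pairwise (· ≤ ·) := List.Pairwise.sublist (ofList_sublist l) h
  have h2 : (PySem.Set.ofList l).Pairwise (· ≠ ·) := List.nodup_iff_pairwise_ne.mp (PySem.Set.nodup_ofList l)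
  exact (h1.and h2).imp (fun ⟨hle, hne⟩ => lt_of_le_of_ne hle hne)

-- ===== VERDICT (by name: the statement is the Claim_ definition above) =====
theorem extract_choices_spec : Claim_equal_extract_choices := by
  intro resource _ hpre
  obtain ⟨hnd0, hmem, hforall⟩ := hpre
  unfold Spec_extract_choices extract_choices extract_choices_alt
  set props := (PySem.Dict.mk resource).getD "properties" [] with hprops
  -- the selected properties list inherits the Nodup facts from Pre_
  have hnd : (props.map (·.1)).Nodup ∧ ∀ pa ∈ props, (pa.2.map (·.1)).Nodup := by
    rw [hprops]
    simp only [PySem.Dict.getD, PySem.Dict.get?]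
    cases hf : List.find? (fun p => p.1 == "properties") resource with
    | none => simp
    | some pr =>
      have hprm : pr ∈ resource := List.mem_of_find?_eq_some hf
      simpa using hforall pr hprm
  set pl := pvPairs props with hpl
  have hplnd : (pl.map (·.1)).Nodup := List.Nodup.sublist (pvPairs_fst_sublist props) hnd.1
  -- A side: property_descriptions is the insert-fold over pl
  dsimp only
  rw [pd_fold props hnd.2, groups_fold props]
  set pd := pl.foldl (fun d q => d.insert q.1 q.2) PySem.Dict.empty with hpd
  have hpditems : pd.items = pl := by
    rw [hpd, PySem.Dict.items_foldl_insert_fresh pl Prod.fst Prod.snd PySem.Dict.empty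
      (by intro a _; simp [PySem.Dict.contains, PySem.Dict.empty]) (by simpa using hplnd)]
    simp [PySem.Dict.empty]
  rw [hpditems]
  set s := PySem.List.sorted pl (fun x => x.2) false with hs
  have hsnd : (s.map (·.1)).Nodup := by
    have hperm : (s.map (·.1)).Perm (pl.map (·.1)) := (PySem.List.sorted_perm pl (fun x => x.2) false).map _
    exact hperm.nodup_iff.mpr hplnd
  set sd := s.foldl (fun d p => d.insert p.1 p.2) PySem.Dict.empty with hsd
  have hsditems : sd.items = s := by
    rw [hsd, PySem.Dict.items_foldl_insert_fresh s Prod.fst Prod.snd PySem.Dict.empty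
      (by intro a _; simp [PySem.Dict.contains, PySem.Dict.empty]) (by simpa using hsnd)]
    simp [PySem.Dict.empty]
  have hsdkeys : sd.keys = s.map Prod.fst := by
    show sd.items.map Prod.fst = s.map Prod.fst
    rw [hsditems]
  rw [hsdkeys]
  -- the groupby key agrees with the description component on every pair of s
  have hkf : ∀ p ∈ s, pd.getD p.1 "" = p.2 := by
    intro p hp
    have hppl : p ∈ pl := (PySem.List.sorted_perm pl (fun x => x.2) false).mem_iff.mp hp
    have : (p.1, p.2) ∈ pd.items := by rw [hpditems]; simpa using hppl
    exact PySem.Dict.getD_of_mem_items pd this (by rw [show pd.keys = pd.items.map Prod.fst from rfl, hpditems]; simpa using hplnd) ""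
  rw [groupBy_sorted (fun v => pd.getD v "") s hkf (PySem.List.sorted_pairwise pl (fun x => x.2))]
  rw [← hpl]
  set D := PySem.Set.ofList (s.map Prod.snd) with hD
  set f : String → String × List String :=
    fun c => (c, (pl.filter (fun q => q.2 == c)).map Prod.fst) with hf
  -- stability of Python's sort: the class of each description is in original order
  have hmapA : D.map (fun c => (c, (s.filter (fun q => q.2 == c)).map Prod.fst)) = D.map f := by
    apply List.map_congr_left
    intro c _
    rw [hf, hs, sorted_filter_key]
  rw [hmapA, PySem.List.foldl_append_ite (fun g : String × List String => g.2.length > 1) (fun g => g.2)]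
  -- B side: characterize the grouping dict
  set G := pl.foldl (fun d q => d.modify q.2 [] (fun ms => ms ++ [q.1])) PySem.Dict.empty with hG
  set descs := PySem.Set.ofList (pl.map Prod.snd) with hdescs
  have hGkeys : G.keys = descs := by
    rw [hG, PySem.Dict.keys_foldl_modify_key pl Prod.snd [] (fun d q => fun ms => ms ++ [q.1])]
    rw [PySem.Dict.keys_empty, hdescs]
    rfl
  have hGget : ∀ c, G.getD c [] = (pl.filter (fun q => q.2 == c)).map Prod.fst := by
    intro c
    have hswap : G = (pl.map (fun q => (q.2, q.1))).foldl
        (fun d p => d.modify p.1 [] (fun x => x ++ [p.2])) PySem.Dict.empty := by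
      rw [hG, List.foldl_map]
    rw [hswap, PySem.Dict.getD_foldl_modify_append]
    simp only [List.filter_map, List.map_map, PySem.Dict.getD_empty, List.nil_append]
    rfl
  have hGitems : G.items = descs.map f := by
    rw [PySem.Dict.items_eq_map_keys G (by rw [hGkeys, hdescs]; exact PySem.Set.nodup_ofList _) [],
      hGkeys]
    apply List.map_congr_left
    intro c _
    rw [hGget c, hf]
  -- the sorted group list is exactly A's group list
  have hDperm : D.Perm descs := by
    apply (List.perm_ext_iff_of_nodup (hD ▸ PySem.Set.nodup_ofList _)
      (hdescs ▸ PySem.Set.nodup_ofList _)).mpr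
    intro x
    rw [hD, hdescs, PySem.Set.mem_ofList, PySem.Set.mem_ofList]
    exact List.Perm.mem_iff ((PySem.List.sorted_perm pl (fun x => x.2) false).map Prod.snd)
  have hsortedB : PySem.List.sorted G.items (fun kv => kv.1) false = D.map f := by
    apply PySem.List.sorted_eq_of_perm_of_pairwise_lt
    · rw [hGitems]
      exact hDperm.map f
    · apply List.pairwise_map.mpr
      have hDlt : D.Pairwise (· < ·) := by
        rw [hD]
        apply ofList_pairwise_lt
        have := PySem.List.sorted_map_key_pairwise pl (fun x => x.2)
        exact this
      exact hDlt.imp (fun h => h)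
  rw [hsortedB]
  simp
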